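-- pv_equiv track=rewrite | github.com/Qascve/04_Dashing_Dingos | groupwork 1/code/align_seqs_better.py | best_alignment_all
-- ===== SOURCE A (Python) =====
-- from typing import Dict, Tuple, List
--
-- def calculate_score(s1: str, s2: str, start: int) -> Tuple[int, str]:
--
--     score = 0
--     matched_chars: List[str] = []
--
--     for i, base in enumerate(s2):
--         j = i + start
--         if j >= len(s1):
--             break  # no further overlap
--         if s1[j] == base:
--             matched_chars.append("*") #match
--             score += 1
--         else:
--             matched_chars.append("-") #mismatch
--
--     return score, ("." * start) + "".join(matched_chars)
--
-- def best_alignment_all(seq1: str, seq2: str) -> Tuple[int, List[int], List[str], List[str], str]: #list inside tuple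
--     """
--     Find the all  placement of seq2 (short) along seq1 (long) for maximum score.
--     If multiple offsets tie, all are kept.
--     """
--     best_score = -1
--     best_starts = [] #added lists to keep all best starts and matched line
--     best_matched_lines: []
--     best_aligned_s2_lines: [] #added lists to keep all best starts and matched line, but not only one
--
--     for start in range(len(seq1)):
--         score, matched_line = calculate_score(seq1, seq2, start)
--         if score > best_score:
--             best_score = score
--             best_starts = [start] #add [] for [start]
--             best_matched_lines = [matched_line] #same here
--             best_aligned_s2_lines = [("." * start) + seq2] #same here, but for aligned s2 line
--         elif score == best_score: #added elif to keep all best matches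
--             best_starts.append(start)
--             best_matched_lines.append(matched_line)
--             best_aligned_s2_lines.append(("." * start) + seq2)
--
--     return best_score, best_starts, best_matched_lines, best_aligned_s2_lines, seq1
-- ===== SOURCE B (Python) =====
-- def best_alignment_all(seq1, seq2):
--     # Character-position index: for each char, the positions where it occurs in seq2;
--     # every matching pair (i in seq1, j in seq2) with the same char votes for offset i - j.
--     pos2 = {}
--     for j, c in enumerate(seq2):
--         pos2[c] = pos2.get(c, []) + [j]
--     cnt = {}
--     for i, c in enumerate(seq1):
--         for j in pos2.get(c, []):
--             if j <= i:
--                 s = i - j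
--                 cnt[s] = cnt.get(s, 0) + 1
--     n = len(seq1)
--     best = max((cnt.get(s, 0) for s in range(n)), default=-1)
--     starts = [s for s in range(n) if cnt.get(s, 0) == best]
--     matched = ["." * s + "".join("*" if a == b else "-" for a, b in zip(seq1[s:], seq2))
--                for s in starts]
--     aligned = ["." * s + seq2 for s in starts]
--     return best, starts, matched, aligned, seq1
-- ===== Notes on version B (the rewrite author's own statement) =====
-- stated objective: alternative
-- what changed: A scans the full overlap at every offset; B builds a character-position index of seq2 and a counter over offsets (each matching character pair (i,j) votes for offset i-j, a sparse cross-correlation), then reconstructs matched/aligned lines only for the best offsets.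
-- outside the precondition, e.g. on best_alignment_all('', 'A'): A raises UnboundLocalError, B returns (-1, [], [], [], '')
-- crash fix: On seq1 == '' A raises UnboundLocalError (best_matched_lines is only annotated, never assigned, and the loop body never runs); B returns (-1, [], [], [], seq1). — e.g. on best_alignment_all("", "A"): A raises UnboundLocalError, B returns (-1, [], [], [], "")
import Mathlib
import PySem

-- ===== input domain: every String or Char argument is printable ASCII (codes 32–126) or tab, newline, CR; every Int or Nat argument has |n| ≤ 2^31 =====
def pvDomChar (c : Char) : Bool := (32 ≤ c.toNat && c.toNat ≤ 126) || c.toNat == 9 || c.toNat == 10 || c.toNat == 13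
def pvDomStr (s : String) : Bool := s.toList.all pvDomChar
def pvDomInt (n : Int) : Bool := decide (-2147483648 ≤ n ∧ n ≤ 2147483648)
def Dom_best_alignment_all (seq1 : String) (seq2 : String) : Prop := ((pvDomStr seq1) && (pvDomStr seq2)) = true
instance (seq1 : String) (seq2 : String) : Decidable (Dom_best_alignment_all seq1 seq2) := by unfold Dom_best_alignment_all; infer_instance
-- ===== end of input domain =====

-- B replaces A's per-offset overlap scan by a character-position index of seq2 and a counter
-- over offsets (each matching character pair votes for offset i-j); lines are rebuilt only for
-- the best offsets.


-- ===== PORT A =====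
-- the for-loop of calculate_score; the s1.getD read is guarded by the length test, so it is exact
def csLoop (s1 : List Char) (start : Nat) : List Char → Nat → Int → List Char → Int × List Char
  | [], _, score, acc => (score, acc)
  | b :: rest, i, score, acc =>
    if s1.length ≤ i + start then (score, acc)
    else if s1.getD (i + start) ' ' = b then
      csLoop s1 start rest (i + 1) (score + 1) (acc ++ ['*'])
    else
      csLoop s1 start rest (i + 1) score (acc ++ ['-'])

def calculate_score (s1 s2 : List Char) (start : Nat) : Int × String :=
  let r := csLoop s1 start s2 0 0 []
  (r.1, String.ofList (List.replicate start '.' ++ r.2))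

-- the body of A's 'for start in range(len(seq1))' loop
def aStep (s1 s2 : List Char) (st : Int × List Int × List String × List String) (start : Nat) :
    Int × List Int × List String × List String :=
  let r := calculate_score s1 s2 start
  if r.1 > st.1 then
    (r.1, [Int.ofNat start], [r.2], [String.ofList (List.replicate start '.' ++ s2)])
  else if r.1 = st.1 then
    (st.1, st.2.1 ++ [Int.ofNat start], st.2.2.1 ++ [r.2],
      st.2.2.2 ++ [String.ofList (List.replicate start '.' ++ s2)])
  else st

def best_alignment_all (seq1 : String) (seq2 : String) : Int × List Int × List String × List String × String :=
  let s1 := seq1.toList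
  let r := (List.range s1.length).foldl (aStep s1 seq2.toList) (-1, [], [], [])
  (r.1, r.2.1, r.2.2.1, r.2.2.2, seq1)

-- ===== PORT B =====
-- pos2[c] = pos2.get(c, []) + [j] over enumerate(seq2)
def posIndex (s2 : List Char) : PySem.Dict Char (List Int) :=
  (PySem.List.enumerate s2).foldl (fun d p => d.modify p.2 [] (· ++ [p.1])) PySem.Dict.empty

-- cnt[i-j] = cnt.get(i-j, 0) + 1 for each i over enumerate(seq1) and j in pos2.get(c, []) with j <= i
def offCounter (s1 : List Char) (pos2 : PySem.Dict Char (List Int)) : PySem.Dict Int Int :=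
  (PySem.List.enumerate s1).foldl
    (fun d p => (pos2.getD p.2 []).foldl
      (fun d j => if j ≤ p.1 then d.modify (p.1 - j) 0 (· + 1) else d) d)
    PySem.Dict.empty

-- "".join("*" if a == b else "-" for a, b in zip(seq1[s:], seq2))
def markLine (s1 s2 : List Char) (s : Nat) : List Char :=
  (List.zip (s1.drop s) s2).map (fun p => if p.1 = p.2 then '*' else '-')

def best_alignment_all_alt (seq1 : String) (seq2 : String) : Int × List Int × List String × List String × String :=
  let s1 := seq1.toList
  let s2 := seq2.toList
  let pos2 := posIndex s2
  let cnt := offCounter s1 pos2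
  let n := s1.length
  let best := (PySem.List.max? ((List.range n).map (fun s => cnt.getD (Int.ofNat s) 0)) (fun x => x)).getD (-1)
  let starts := ((List.range n).filter (fun s => cnt.getD (Int.ofNat s) 0 = best)).map Int.ofNat
  let matched := starts.map (fun s => String.ofList (List.replicate s.toNat '.' ++ markLine s1 s2 s.toNat))
  let aligned := starts.map (fun s => String.ofList (List.replicate s.toNat '.' ++ s2))
  (best, starts, matched, aligned, seq1)

-- ===== PRECONDITION & SPEC =====
-- Pre_ excludes only seq1 == "", where the Python A raises UnboundLocalError (best_matched_lines
-- is only annotated, never assigned, when the loop body never runs).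
def Pre_best_alignment_all (seq1 : String) (seq2 : String) : Prop := seq1 ≠ ""
instance (seq1 : String) (seq2 : String) : Decidable (Pre_best_alignment_all seq1 seq2) := by
  unfold Pre_best_alignment_all; infer_instance

def pvWitness_best_alignment_all : String × String := ("ACGT", "CG")

-- On seq1 == "" A raises UnboundLocalError; B returns (-1, [], [], [], seq1)
-- (checked below by best_alignment_all_raises).
def Raises_best_alignment_all (seq1 : String) (seq2 : String) : Prop := seq1 = ""
instance (seq1 : String) (seq2 : String) : Decidable (Raises_best_alignment_all seq1 seq2) := by
  unfold Raises_best_alignment_all; infer_instance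
def pvRaiseWitness_best_alignment_all : String × String := ("", "A")
def pvRaiseWitnessOut_best_alignment_all : Int × List Int × List String × List String × String :=
  (-1, [], [], [], "")

def Spec_best_alignment_all (seq1 : String) (seq2 : String) (out : Int × List Int × List String × List String × String) : Prop := out = best_alignment_all_alt seq1 seq2
instance (seq1 : String) (seq2 : String) (out : Int × List Int × List String × List String × String) : Decidable (Spec_best_alignment_all seq1 seq2 out) := by unfold Spec_best_alignment_all; infer_instance

-- ===== CLAIM (what is proved, stated in full; the proofs are below) =====
def Claim_equal_best_alignment_all : Prop := ∀ (seq1 : String) (seq2 : String), Dom_best_alignment_all seq1 seq2 → Pre_best_alignment_all seq1 seq2 → Spec_best_alignment_all seq1 seq2 (best_alignment_all seq1 seq2)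

def Claim_raises_best_alignment_all : Prop := (∀ (seq1 : String) (seq2 : String), Dom_best_alignment_all seq1 seq2 → Raises_best_alignment_all seq1 seq2 → ¬ Pre_best_alignment_all seq1 seq2) ∧ (Dom_best_alignment_all (pvRaiseWitness_best_alignment_all.1) (pvRaiseWitness_best_alignment_all.2) ∧ Raises_best_alignment_all (pvRaiseWitness_best_alignment_all.1) (pvRaiseWitness_best_alignment_all.2) ∧ best_alignment_all_alt (pvRaiseWitness_best_alignment_all.1) (pvRaiseWitness_best_alignment_all.2) = pvRaiseWitnessOut_best_alignment_all)

-- ===== LEMMAS AND PROOFS =====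

-- the common score of one offset, used to characterise both ports
def scoreAt (s1 s2 : List Char) (s : Nat) : Int :=
  ((List.zip (s1.drop s) s2).countP (fun p => p.1 == p.2) : Int)

theorem csLoop_eq (s1 : List Char) (start : Nat) :
    ∀ (s2 : List Char) (i : Nat) (sc : Int) (acc : List Char),
      csLoop s1 start s2 i sc acc =
        (sc + ((List.zip (s1.drop (start + i)) s2).countP (fun p => p.1 == p.2) : Int),
         acc ++ (List.zip (s1.drop (start + i)) s2).map (fun p => if p.1 = p.2 then '*' else '-')) := by
  intro s2
  induction s2 with
  | nil => intro i sc acc; simp [csLoop]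
  | cons b rest ih =>
    intro i sc acc
    by_cases h : s1.length ≤ i + start
    · have hd : s1.drop (start + i) = [] := by
        apply List.drop_eq_nil_of_le; omega
      simp [csLoop, h, hd]
    · have hlt : start + i < s1.length := by omega
      have hd : s1.drop (start + i) = s1[start + i] :: s1.drop (start + i + 1) := by
        exact (List.getElem_cons_drop hlt).symm
      have hget : s1.getD (i + start) ' ' = s1[start + i] := by
        rw [List.getD_eq_getElem?_getD, List.getElem?_eq_getElem (by omega : i + start < s1.length)]
        simp; congr 1; omega
      have hsucc : start + (i + 1) = start + i + 1 := by omega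
      by_cases he : s1[start + i] = b
      · rw [csLoop]
        simp only [if_neg h, hget, if_pos he, ih (i+1) (sc+1) (acc ++ ['*'])]
        rw [hd, hsucc]
        simp [List.zip_cons_cons, List.countP_cons, he]
        ring
      · rw [csLoop]
        simp only [if_neg h, hget, if_neg he, ih (i+1) sc (acc ++ ['-'])]
        rw [hd, hsucc, List.zip_cons_cons, List.countP_cons, List.map_cons, if_neg he]
        have hbe : (s1[start + i] == b) = false := by simp [he]
        rw [hbe]
        simp

theorem calculate_score_eq (s1 s2 : List Char) (start : Nat) :
    calculate_score s1 s2 start =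
      (scoreAt s1 s2 start, String.ofList (List.replicate start '.' ++ markLine s1 s2 start)) := by
  simp [calculate_score, csLoop_eq s1 start s2 0 0 [], scoreAt, markLine]

-- abbreviations for the state of A's fold (proof-side only)
def gM (s1 s2 : List Char) (s : Nat) : String :=
  String.ofList (List.replicate s '.' ++ markLine s1 s2 s)
def gA (s2 : List Char) (s : Nat) : String :=
  String.ofList (List.replicate s '.' ++ s2)
def stState (s1 s2 : List Char) (b : Int) (ss : List Nat) : Int × List Int × List String × List String :=
  (b, ss.map Int.ofNat, ss.map (gM s1 s2), ss.map (gA s2))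

theorem aStep_gt (s1 s2 : List Char) (b : Int) (ss : List Nat) (s : Nat)
    (h : b < scoreAt s1 s2 s) :
    aStep s1 s2 (stState s1 s2 b ss) s = stState s1 s2 (scoreAt s1 s2 s) [s] := by
  simp only [aStep, calculate_score_eq, stState, gM, gA, List.map]
  rw [if_pos h]

theorem aStep_tie (s1 s2 : List Char) (b : Int) (ss : List Nat) (s : Nat)
    (h : scoreAt s1 s2 s = b) :
    aStep s1 s2 (stState s1 s2 b ss) s = stState s1 s2 b (ss ++ [s]) := by
  simp only [aStep, calculate_score_eq, stState, gM, gA, List.map_append, List.map]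
  rw [if_neg (by omega), if_pos h]

theorem aStep_lt (s1 s2 : List Char) (b : Int) (ss : List Nat) (s : Nat)
    (h : scoreAt s1 s2 s < b) :
    aStep s1 s2 (stState s1 s2 b ss) s = stState s1 s2 b ss := by
  simp only [aStep, calculate_score_eq, stState]
  rw [if_neg (by omega), if_neg (by omega)]

-- the invariant of A's main fold: running best = running max, kept entries = all arg-maxes so far
theorem aFold_eq (s1 s2 : List Char) :
    ∀ (l : List Nat) (b : Int) (ss : List Nat),
      l.foldl (aStep s1 s2) (stState s1 s2 b ss) =
      stState s1 s2 (l.foldl (fun a s => max a (scoreAt s1 s2 s)) b)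
        ((if b = l.foldl (fun a s => max a (scoreAt s1 s2 s)) b then ss else []) ++
          l.filter (fun s => scoreAt s1 s2 s = l.foldl (fun a s => max a (scoreAt s1 s2 s)) b)) := by
  intro l
  induction l with
  | nil => intro b ss; simp
  | cons s rest ih =>
    intro b ss
    have hM := PySem.List.le_foldl_max_int rest (scoreAt s1 s2)
    rcases lt_trichotomy b (scoreAt s1 s2 s) with hgt | heq | hlt
    · rw [List.foldl_cons, aStep_gt s1 s2 b ss s hgt, ih]
      have hmax : max b (scoreAt s1 s2 s) = scoreAt s1 s2 s := by omega
      have hble : scoreAt s1 s2 s ≤ rest.foldl (fun a s => max a (scoreAt s1 s2 s)) (scoreAt s1 s2 s) :=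
        (hM (scoreAt s1 s2 s)).1
      have hbne : ¬ (b = rest.foldl (fun a s => max a (scoreAt s1 s2 s)) (scoreAt s1 s2 s)) := by omega
      simp only [List.foldl_cons, hmax, List.filter_cons, if_neg hbne]
      set M := rest.foldl (fun a s => max a (scoreAt s1 s2 s)) (scoreAt s1 s2 s) with hMdef
      by_cases hs : scoreAt s1 s2 s = M
      · simp [hs]
      · simp [hs]
    · rw [List.foldl_cons, aStep_tie s1 s2 b ss s heq.symm, ih]
      have hmax : max b (scoreAt s1 s2 s) = b := by omega
      simp only [List.foldl_cons, hmax, List.filter_cons]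
      set M := rest.foldl (fun a s => max a (scoreAt s1 s2 s)) b with hMdef
      by_cases hb : b = M
      · have hs : scoreAt s1 s2 s = M := by omega
        simp [hb, hs]
      · have hs : ¬ (scoreAt s1 s2 s = M) := by omega
        simp [hb, hs]
    · rw [List.foldl_cons, aStep_lt s1 s2 b ss s hlt, ih]
      have hmax : max b (scoreAt s1 s2 s) = b := by omega
      have hble : b ≤ rest.foldl (fun a s => max a (scoreAt s1 s2 s)) b := (hM b).1
      have hs : ¬ (scoreAt s1 s2 s = rest.foldl (fun a s => max a (scoreAt s1 s2 s)) b) := by omega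
      simp only [List.foldl_cons, hmax, List.filter_cons]
      simp [hs]

-- Python max(xs, default=-1) on nonnegative entries is the running max started at -1
theorem maxD_neg_one (l : List Int) (h : ∀ x ∈ l, 0 ≤ x) :
    (PySem.List.max? l (fun y => y)).getD (-1) = l.foldl max (-1) := by
  cases l with
  | nil =>
    have : PySem.List.max? ([] : List Int) (fun y => y) = none := by
      rw [PySem.List.max?_eq_none_iff]
    simp [this]
  | cons x t =>
    rw [PySem.List.max?_id_cons]
    simp only [Option.getD_some, List.foldl_cons]
    have hx : max (-1 : Int) x = x := max_eq_right (by have := h x (by simp); omega)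
    rw [hx]

-- enumerate as a map over range
theorem enum_eq_map_range (l : List Char) :
    ∀ (s : Int), PySem.List.enumerate l s =
      (List.range l.length).map (fun k : Nat => ((s + (k : Int) : Int), l.getD k ' ')) := by
  induction l with
  | nil => intro s; simp [PySem.List.enumerate_nil]
  | cons x t ih =>
    intro s
    rw [PySem.List.enumerate_cons, ih (s + 1)]
    rw [List.length_cons, List.range_succ_eq_map, List.map_cons, List.map_map]
    congr 1
    · norm_num
    · apply List.map_congr_left
      intro k _
      simp only [Function.comp_apply, List.getD_cons_succ]
      congr 1
      push_cast
      ring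

-- the j-position list stored for character c
theorem posIndex_getD (s2 : List Char) (c : Char) :
    (posIndex s2).getD c [] =
      ((List.range s2.length).filter (fun j => s2.getD j ' ' == c)).map (fun j : Nat => (j : Int)) := by
  unfold posIndex
  have hswap : (PySem.List.enumerate s2).foldl (fun d p => d.modify p.2 [] (· ++ [p.1])) PySem.Dict.empty
      = ((PySem.List.enumerate s2).map Prod.swap).foldl (fun d q => d.modify q.1 [] (· ++ [q.2])) PySem.Dict.empty := by
    rw [List.foldl_map]
    rfl
  rw [hswap, PySem.Dict.getD_foldl_modify_append]
  rw [enum_eq_map_range s2 0, List.map_map, List.filter_map, List.map_map]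
  have h1 : ((fun (q : Char × Int) => q.1 == c) ∘ (Prod.swap ∘ (fun k : Nat => (((0 : Int) + (k : Int) : Int), s2.getD k ' '))))
      = (fun j => s2.getD j ' ' == c) := rfl
  rw [h1]
  apply List.map_congr_left
  intro j _
  simp [Function.comp]

-- the inner loop over one position list
theorem innerCount (i s : Int) :
    ∀ (pos : List Int) (d : PySem.Dict Int Int),
      ((pos.foldl (fun d j => if j ≤ i then d.modify (i - j) 0 (· + 1) else d) d).getD s 0)
        = d.getD s 0 + ((pos.filter (fun j => j ≤ i)).countP (fun j => i - j == s) : Int) := by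
  intro pos
  induction pos with
  | nil => intro d; simp
  | cons j rest ih =>
    intro d
    by_cases hj : j ≤ i
    · rw [List.foldl_cons, if_pos hj, ih, List.filter_cons, if_pos (by simpa using hj),
        List.countP_cons, PySem.Dict.getD_modify]
      by_cases he : i - j = s
      · have hb : (i - j == s) = true := by simpa using he
        rw [if_pos he.symm, hb, he]
        simp
        omega
      · have hb : (i - j == s) = false := by simpa using he
        rw [if_neg (fun h => he h.symm), hb]
        simp
    · rw [List.foldl_cons, if_neg hj, ih, List.filter_cons, if_neg (by simpa using hj)]

-- the outer loop over enumerate(seq1)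
theorem outerCount (pos2 : PySem.Dict Char (List Int)) (s : Int) :
    ∀ (l : List (Int × Char)) (d : PySem.Dict Int Int),
      ((l.foldl (fun d p => (pos2.getD p.2 []).foldl
          (fun d j => if j ≤ p.1 then d.modify (p.1 - j) 0 (· + 1) else d) d) d).getD s 0)
        = d.getD s 0 +
          (l.map (fun p => ((((pos2.getD p.2 []).filter (fun j => j ≤ p.1)).countP (fun j => p.1 - j == s)) : Int))).sum := by
  intro l
  induction l with
  | nil => intro d; simp
  | cons p rest ih =>
    intro d
    rw [List.foldl_cons, ih, innerCount]
    simp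
    ring

-- the per-index value of the counter sum
theorem perIndex (s2 : List Char) (k s0 : Nat) (c : Char) :
    ((((posIndex s2).getD c []).filter (fun j => j ≤ (k : Int))).countP (fun j => (k : Int) - j == (s0 : Int)) : Int)
      = if s0 ≤ k ∧ k - s0 < s2.length ∧ s2.getD (k - s0) ' ' = c then 1 else 0 := by
  rw [posIndex_getD]
  have hpred : (fun j : Int => ((k : Int) - j == (s0 : Int))) = (fun j : Int => j == ((k : Int) - (s0 : Int))) := by
    funext j
    by_cases h : (k : Int) - j = (s0 : Int)
    · have h2 : j = (k : Int) - (s0 : Int) := by omega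
      simp [h, h2]
    · have h2 : ¬ (j = (k : Int) - (s0 : Int)) := by omega
      simp [h, h2]
  rw [hpred, ← List.count_eq_countP]
  by_cases hs : s0 ≤ k
  · have hv : ((k : Int) - (s0 : Int)) = (((k - s0 : Nat) : Int)) := by omega
    have hB : decide ((((k - s0 : Nat) : Int)) ≤ (k : Int)) = true := by
      simp only [decide_eq_true_eq]
      omega
    have hinj : Function.Injective (fun j : Nat => (j : Int)) := fun a b h => by
      simpa using h
    rw [hv, List.count_filter (p := fun j : Int => decide (j ≤ (k : Int)))
        (a := (((k - s0 : Nat) : Int))) hB,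
      List.count_map_of_injective _ _ hinj]
    by_cases hA : (s2.getD (k - s0) ' ' == c) = true
    · rw [List.count_filter (p := fun j => s2.getD j ' ' == c) (a := k - s0) hA, List.count_range]
      by_cases hm : k - s0 < s2.length
      · rw [if_pos hm, if_pos ⟨hs, hm, by simpa using hA⟩]
        simp
      · rw [if_neg hm, if_neg (fun h => hm h.2.1)]
        simp
    · have hz : List.count (k - s0) ((List.range s2.length).filter (fun j => s2.getD j ' ' == c)) = 0 := by
        rw [List.count_eq_zero]
        intro hmem
        exact hA (List.mem_filter.mp hmem).2
      rw [hz, if_neg (fun h => hA (by simpa using h.2.2))]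
      simp
  · have hz : List.count ((k : Int) - (s0 : Int))
        (List.filter (fun j => decide (j ≤ (k : Int)))
          (((List.range s2.length).filter (fun j => s2.getD j ' ' == c)).map (fun j : Nat => (j : Int)))) = 0 := by
      rw [List.count_eq_zero]
      intro hmem
      have hmem2 := List.mem_filter.mp hmem
      obtain ⟨j, _, hj⟩ := List.mem_map.mp hmem2.1
      omega
    rw [hz, if_neg (fun h => hs h.1)]
    simp

-- sum of indicators is a countP
theorem sum_indicator (P : Nat → Bool) :
    ∀ (l : List Nat), (l.map (fun k => if P k = true then (1 : Int) else 0)).sum = (l.countP P : Int) := by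
  intro l
  induction l with
  | nil => simp
  | cons x t ih =>
    rw [List.map_cons, List.sum_cons, ih, List.countP_cons]
    by_cases h : P x = true <;> simp [h] <;> ring

-- zip against an appended last element
theorem zip_append_single (x : Char) :
    ∀ (a b : List Char), List.zip (a ++ [x]) b = List.zip a b ++ List.zip [x] (b.drop a.length) := by
  intro a
  induction a with
  | nil => intro b; simp
  | cons y ys ih =>
    intro b
    cases b with
    | nil => simp
    | cons z zs => simp [List.zip_cons_cons, ih zs]

-- the positional characterisation of one offset's score
theorem score_pos (s0 : Nat) :
    ∀ (s1 s2 : List Char),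
      (List.range s1.length).countP
        (fun k => decide (s0 ≤ k) && (decide (k - s0 < s2.length) && (s2.getD (k - s0) ' ' == s1.getD k ' ')))
      = (List.zip (s1.drop s0) s2).countP (fun p => p.1 == p.2) := by
  intro s1
  induction s1 using List.reverseRecOn with
  | nil => intro s2; simp
  | append_singleton s1' x ih =>
    intro s2
    have hn : (s1' ++ [x]).length = s1'.length + 1 := by simp
    rw [hn, List.range_succ, List.countP_append]
    have hcongr : ∀ k ∈ List.range s1'.length,
        (decide (s0 ≤ k) && (decide (k - s0 < s2.length) && (s2.getD (k - s0) ' ' == (s1' ++ [x]).getD k ' '))) = true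
          ↔ (decide (s0 ≤ k) && (decide (k - s0 < s2.length) && (s2.getD (k - s0) ' ' == s1'.getD k ' '))) = true := by
      intro k hk
      have hk' : k < s1'.length := List.mem_range.mp hk
      rw [List.getD_append _ _ _ _ hk']
    rw [List.countP_congr hcongr, ih s2]
    by_cases hle : s0 ≤ s1'.length
    · have hdrop : (s1' ++ [x]).drop s0 = s1'.drop s0 ++ [x] := by
        rw [List.drop_append_of_le_length hle]
      rw [hdrop, zip_append_single, List.countP_append]
      have hlen : (s1'.drop s0).length = s1'.length - s0 := by simp
      rw [hlen]
      have hgetx : (s1' ++ [x]).getD s1'.length ' ' = x := by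
        rw [List.getD_eq_getElem?_getD, List.getElem?_concat_length]
        rfl
      congr 1
      simp only [List.countP_cons, List.countP_nil, hgetx]
      by_cases hm : s1'.length - s0 < s2.length
      · have hd2 : s2.drop (s1'.length - s0) = s2[s1'.length - s0] :: s2.drop (s1'.length - s0 + 1) :=
          (List.getElem_cons_drop hm).symm
        have hg2 : s2.getD (s1'.length - s0) ' ' = s2[s1'.length - s0] := by
          rw [List.getD_eq_getElem?_getD, List.getElem?_eq_getElem hm]
          rfl
        rw [hd2, hg2]
        simp only [List.zip_cons_cons, List.zip_nil_left, List.countP_cons, List.countP_nil]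
        by_cases he : s2[s1'.length - s0] = x
        · simp [he, hle, hm]
        · have h1 : (x == s2[s1'.length - s0]) = false := by
            apply beq_eq_false_iff_ne.mpr
            exact fun h => he h.symm
          have h2 : (s2[s1'.length - s0] == x) = false := by simp [he]
          simp [h1, h2, hle, hm]
      · have hd2 : s2.drop (s1'.length - s0) = [] := by
          apply List.drop_eq_nil_of_le; omega
        rw [hd2]
        simp [hm]
    · have hdrop1 : (s1' ++ [x]).drop s0 = [] := by
        apply List.drop_eq_nil_of_le; simp; omega
      have hdrop2 : s1'.drop s0 = [] := by
        apply List.drop_eq_nil_of_le; omega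
      rw [hdrop1, hdrop2]
      simp [hle]

-- the key fact: the counter stores exactly the per-offset score
theorem counter_eq_score (s1 s2 : List Char) (s0 : Nat) :
    (offCounter s1 (posIndex s2)).getD (Int.ofNat s0) 0 = scoreAt s1 s2 s0 := by
  unfold offCounter
  rw [outerCount, PySem.Dict.getD_empty]
  rw [enum_eq_map_range s1 0, List.map_map]
  have hmap : ∀ k ∈ List.range s1.length,
      ((fun p => ((((posIndex s2).getD p.2 []).filter (fun j => j ≤ p.1)).countP (fun j => p.1 - j == (Int.ofNat s0)) : Int)) ∘
        (fun k : Nat => (((0 : Int) + (k : Int) : Int), s1.getD k ' '))) k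
        = (fun k => if (fun k => decide (s0 ≤ k) && (decide (k - s0 < s2.length) && (s2.getD (k - s0) ' ' == s1.getD k ' '))) k = true then (1 : Int) else 0) k := by
    intro k _
    simp only [Function.comp, zero_add]
    simp only [Int.ofNat_eq_natCast]
    rw [perIndex s2 k s0 (s1.getD k ' ')]
    by_cases h : s0 ≤ k ∧ k - s0 < s2.length ∧ s2.getD (k - s0) ' ' = s1.getD k ' '
    · simp [h.1, h.2.1, h.2.2]
    · rw [if_neg h, if_neg (by simpa using h)]
  rw [List.map_congr_left hmap, sum_indicator, score_pos s0 s1 s2]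
  simp [scoreAt]

-- ===== VERDICT (by name: the statement is the Claim_ definition above) =====
theorem best_alignment_all_spec : Claim_equal_best_alignment_all := by
  unfold Claim_equal_best_alignment_all
  intro seq1 seq2 _ _
  unfold Spec_best_alignment_all
  have hA : (List.range seq1.toList.length).foldl (aStep seq1.toList seq2.toList) (-1, [], [], []) =
      stState seq1.toList seq2.toList ((List.range seq1.toList.length).foldl (fun a s => max a (scoreAt seq1.toList seq2.toList s)) (-1)) ((List.range seq1.toList.length).filter (fun s => scoreAt seq1.toList seq2.toList s = (List.range seq1.toList.length).foldl (fun a s => max a (scoreAt seq1.toList seq2.toList s)) (-1))) := by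
    have h := aFold_eq seq1.toList seq2.toList (List.range seq1.toList.length) (-1) []
    simpa [stState] using h
  have hK : ∀ s : Nat, (offCounter seq1.toList (posIndex seq2.toList)).getD (Int.ofNat s) 0 = scoreAt seq1.toList seq2.toList s :=
    counter_eq_score seq1.toList seq2.toList
  have hmap : (List.range seq1.toList.length).map (fun s => (offCounter seq1.toList (posIndex seq2.toList)).getD (Int.ofNat s) 0)
      = (List.range seq1.toList.length).map (scoreAt seq1.toList seq2.toList) := by
    apply List.map_congr_left
    intro s _
    exact hK s
  have hnon : ∀ x ∈ (List.range seq1.toList.length).map (scoreAt seq1.toList seq2.toList), 0 ≤ x := by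
    intro x hx
    obtain ⟨s, _, rfl⟩ := List.mem_map.mp hx
    simp [scoreAt]
  have hbest : (PySem.List.max? ((List.range seq1.toList.length).map (fun s => (offCounter seq1.toList (posIndex seq2.toList)).getD (Int.ofNat s) 0)) (fun x => x)).getD (-1) =
      (List.range seq1.toList.length).foldl (fun a s => max a (scoreAt seq1.toList seq2.toList s)) (-1) := by
    rw [hmap, maxD_neg_one _ hnon, List.foldl_map]
  have hstarts : (List.range seq1.toList.length).filter
        (fun s => (offCounter seq1.toList (posIndex seq2.toList)).getD (Int.ofNat s) 0 = (List.range seq1.toList.length).foldl (fun a s => max a (scoreAt seq1.toList seq2.toList s)) (-1))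
      = (List.range seq1.toList.length).filter (fun s => scoreAt seq1.toList seq2.toList s = (List.range seq1.toList.length).foldl (fun a s => max a (scoreAt seq1.toList seq2.toList s)) (-1)) := by
    apply List.filter_congr
    intro s _
    rw [hK s]
  show (((List.range seq1.toList.length).foldl (aStep seq1.toList seq2.toList) (-1, [], [], [])).1,
        ((List.range seq1.toList.length).foldl (aStep seq1.toList seq2.toList) (-1, [], [], [])).2.1,
        ((List.range seq1.toList.length).foldl (aStep seq1.toList seq2.toList) (-1, [], [], [])).2.2.1,
        ((List.range seq1.toList.length).foldl (aStep seq1.toList seq2.toList) (-1, [], [], [])).2.2.2, seq1) =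
      best_alignment_all_alt seq1 seq2
  rw [hA]
  unfold best_alignment_all_alt
  simp only [hbest, hstarts]
  simp [stState, gM, gA, List.map_map, Function.comp]

@[simp]
theorem best_alignment_all_raises : Claim_raises_best_alignment_all := by
  unfold Claim_raises_best_alignment_all
  exact ⟨fun _ _ _ h => by simpa [Pre_best_alignment_all] using h, by decide⟩
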